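-- pv_equiv track=rewrite | github.com/nickest14/Leetcode-python | python/easy/Solution_2154.py | findFinalValue
-- ===== SOURCE A (Python) =====
-- from typing import List
--
-- def findFinalValue(nums: List[int], original: int) -> int:
--     bits: int = 0
--     for num in nums:
--         if num % original != 0:
--             continue
--         n: int = num // original
--         if n & (n - 1) == 0:
--             bits |= n
--     digit: int = bits + 1
--     return original * (digit & -digit)
-- ===== SOURCE B (Python) =====
-- def findFinalValue(nums, original):
--     s = set(nums)
--     while original in s:
--         original *= 2
--     return original
-- ===== Notes on version B (the rewrite author's own statement) =====
-- stated objective: simpler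
-- what changed: Replaces the bitmask accumulation over quotients plus lowest-set-bit extraction with the canonical chain-following loop: build a set of nums and repeatedly double original while it is present.
-- outside the precondition, e.g. on findFinalValue([3], 0): A raises ZeroDivisionError, B returns 0
import Mathlib
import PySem

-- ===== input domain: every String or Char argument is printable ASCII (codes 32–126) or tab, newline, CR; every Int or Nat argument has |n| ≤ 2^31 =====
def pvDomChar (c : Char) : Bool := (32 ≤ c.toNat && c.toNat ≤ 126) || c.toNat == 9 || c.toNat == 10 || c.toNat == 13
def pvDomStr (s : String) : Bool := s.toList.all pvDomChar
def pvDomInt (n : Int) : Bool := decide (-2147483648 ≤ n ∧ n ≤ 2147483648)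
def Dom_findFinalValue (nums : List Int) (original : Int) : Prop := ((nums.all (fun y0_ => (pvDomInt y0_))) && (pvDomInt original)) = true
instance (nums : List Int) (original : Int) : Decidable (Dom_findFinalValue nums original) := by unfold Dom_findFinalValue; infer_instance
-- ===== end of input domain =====

-- B replaces A's bitmask-of-quotients accumulation and lowest-set-bit extraction with the
-- canonical solution: a set of nums and a loop doubling `original` while it is present
-- (objective: simpler; same cost).

-- ===== PORT A =====
-- A: accumulate a bitmask of the powers-of-two quotients, then extract the lowest unset bit.
def findFinalValue (nums : List Int) (original : Int) : Int :=
  let bits : Int := nums.foldl (fun bits num =>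
    if PySem.Int.mod num original ≠ 0 then bits
    else
      let n : Int := PySem.Int.floordiv num original
      if PySem.Int.band n (n - 1) = 0 then PySem.Int.bor bits n else bits) 0
  let digit : Int := bits + 1
  original * PySem.Int.band digit (-digit)

-- ===== PORT B =====
-- B (Source B): build a set of nums and double `original` while it is present.  The Python
-- `while` loop is ported with fuel nums.length + 1; the proofs show the loop exits before the
-- fuel runs out on every input satisfying Pre_ (the values original*2^k probed before the
-- answer are pairwise distinct members of nums, so there are at most nums.length of them).
def pvChase (s : PySem.Set Int) : Nat → Int → Int
  | 0, o => o
  | fuel + 1, o => if o ∈ s then pvChase s fuel (2 * o) else o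

def findFinalValue_alt (nums : List Int) (original : Int) : Int :=
  pvChase (PySem.Set.ofList nums) (nums.length + 1) original

-- ===== PRECONDITION & SPEC =====
-- Pre_ excludes exactly the inputs where Python A raises ZeroDivisionError (num % 0):
-- original = 0 with a nonempty nums.
def Pre_findFinalValue (nums : List Int) (original : Int) : Prop :=
  nums = [] ∨ original ≠ 0
instance (nums : List Int) (original : Int) : Decidable (Pre_findFinalValue nums original) := by
  unfold Pre_findFinalValue; infer_instance

def pvWitness_findFinalValue : List Int × Int := ([5, 3, 6, 1, 12], 3)

def Spec_findFinalValue (nums : List Int) (original : Int) (out : Int) : Prop := out = findFinalValue_alt nums original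
instance (nums : List Int) (original : Int) (out : Int) : Decidable (Spec_findFinalValue nums original out) := by unfold Spec_findFinalValue; infer_instance

-- ===== CLAIM (what is proved, stated in full; the proofs are below) =====
def Claim_equal_findFinalValue : Prop := ∀ (nums : List Int) (original : Int), Dom_findFinalValue nums original → Pre_findFinalValue nums original → Spec_findFinalValue nums original (findFinalValue nums original)

-- ===== LEMMAS AND PROOFS =====

-- Nat bit lemmas ------------------------------------------------------------

theorem pv_land_self (a : Nat) : a &&& a = a := by
  apply Nat.eq_of_testBit_eq; intro i; rw [Nat.testBit_land, Bool.and_self]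

theorem pv_land_even_odd (a b : Nat) : (2 * a) &&& (2 * b + 1) = 2 * (a &&& b) := by
  apply Nat.eq_of_testBit_eq
  intro i
  cases i with
  | zero => simp [Nat.testBit_zero, Nat.mul_mod_right]
  | succ i =>
      have h1 : 2 * a / 2 = a := by omega
      have h2 : (2 * b + 1) / 2 = b := by omega
      have h3 : 2 * (a &&& b) / 2 = a &&& b := by omega
      rw [Nat.testBit_land, Nat.testBit_succ, Nat.testBit_succ, Nat.testBit_succ,
        h1, h2, h3, Nat.testBit_land]

theorem pv_land_odd_even (a b : Nat) : (2 * a + 1) &&& (2 * b) = 2 * (a &&& b) := by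
  apply Nat.eq_of_testBit_eq
  intro i
  cases i with
  | zero => simp [Nat.testBit_zero, Nat.mul_mod_right]
  | succ i =>
      have h1 : (2 * a + 1) / 2 = a := by omega
      have h2 : 2 * b / 2 = b := by omega
      have h3 : 2 * (a &&& b) / 2 = a &&& b := by omega
      rw [Nat.testBit_land, Nat.testBit_succ, Nat.testBit_succ, Nat.testBit_succ,
        h1, h2, h3, Nat.testBit_land]

-- y &&& (y - 1) clears the lowest set bit of y = 2 ^ t * (2 * a + 1)
theorem pv_lowbit (t : Nat) : ∀ a : Nat,
    (2 ^ t * (2 * a + 1)) &&& (2 ^ t * (2 * a + 1) - 1) = 2 ^ t * (2 * a + 1) - 2 ^ t := by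
  induction t with
  | zero =>
      intro a
      simp only [pow_zero, one_mul]
      have h : 2 * a + 1 - 1 = 2 * a := by omega
      rw [h, pv_land_odd_even, pv_land_self]
  | succ t ih =>
      intro a
      have hy : 0 < 2 ^ t * (2 * a + 1) := by positivity
      have h1 : 2 ^ (t + 1) * (2 * a + 1) = 2 * (2 ^ t * (2 * a + 1)) := by ring
      have h2 : 2 * (2 ^ t * (2 * a + 1)) - 1 = 2 * (2 ^ t * (2 * a + 1) - 1) + 1 := by omega
      rw [h1, h2, pv_land_even_odd, ih a]
      have h3 : 2 ^ t ≤ 2 ^ t * (2 * a + 1) := Nat.le_mul_of_pos_right _ (by omega)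
      rw [pow_succ]
      omega

theorem pv_pow_land_pred (j : Nat) : (2 ^ j) &&& (2 ^ j - 1) = 0 := by
  have h := pv_lowbit j 0
  simp only [Nat.mul_zero, Nat.zero_add, Nat.mul_one] at h
  rw [h, Nat.sub_self]

theorem pv_land_pred_zero_pow (n : Nat) (hn : n ≠ 0) (h : n &&& (n - 1) = 0) :
    ∃ j : Nat, n = 2 ^ j := by
  obtain ⟨k, m, hm, rfl⟩ := Nat.exists_eq_two_pow_mul_odd hn
  obtain ⟨a, rfl⟩ := hm
  rw [pv_lowbit k a] at h
  have h3 : 2 ^ k ≤ 2 ^ k * (2 * a + 1) := Nat.le_mul_of_pos_right _ (by omega)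
  exact ⟨k, by omega⟩

-- if every bit below t is set and bit t is clear, then x + 1 = 2 ^ t * odd
theorem pv_succ_eq_pow_mul_odd (t : Nat) : ∀ x : Nat,
    (∀ k, k < t → x.testBit k = true) → x.testBit t = false →
    ∃ a : Nat, x + 1 = 2 ^ t * (2 * a + 1) := by
  induction t with
  | zero =>
      intro x _ h2
      simp only [Nat.testBit_zero, decide_eq_false_iff_not] at h2
      exact ⟨x / 2, by omega⟩
  | succ t ih =>
      intro x h1 h2
      have hodd : x % 2 = 1 := by
        have h := h1 0 (by omega)
        simp only [Nat.testBit_zero, decide_eq_true_eq] at h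
        exact h
      obtain ⟨a, ha⟩ := ih (x / 2)
        (fun k hk => by
          have h := h1 (k + 1) (by omega)
          rwa [Nat.testBit_succ] at h)
        (by rwa [Nat.testBit_succ] at h2)
      refine ⟨a, ?_⟩
      have h : x + 1 = 2 * (x / 2 + 1) := by omega
      rw [h, ha]
      ring

-- Int-level facts about A's primitives --------------------------------------

theorem pv_two_pow_inj {j k : Nat} (h : (2 : Int) ^ j = (2 : Int) ^ k) : j = k := by
  have h' : ((2 ^ j : Nat) : Int) = ((2 ^ k : Nat) : Int) := by push_cast; exact h
  exact Nat.pow_right_injective (le_refl 2) (by exact_mod_cast h')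

theorem pv_band_pred_eq_zero_iff (d : Int) :
    PySem.Int.band d (d - 1) = 0 ↔ d = 0 ∨ ∃ j : Nat, d = (2 : Int) ^ j := by
  constructor
  · intro h
    rcases lt_trichotomy d 0 with hd | hd | hd
    · exfalso
      simp only [PySem.Int.band, if_neg (by omega : ¬ (0 : Int) ≤ d),
        if_neg (by omega : ¬ (0 : Int) ≤ d - 1)] at h
      omega
    · exact Or.inl hd
    · right
      simp only [PySem.Int.band, if_pos (le_of_lt hd), if_pos (by omega : (0 : Int) ≤ d - 1)] at h
      have hcast : d.toNat &&& (d - 1).toNat = 0 := by exact_mod_cast h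
      have htn : (d - 1).toNat = d.toNat - 1 := by omega
      rw [htn] at hcast
      obtain ⟨j, hj⟩ := pv_land_pred_zero_pow d.toNat (by omega) hcast
      refine ⟨j, ?_⟩
      have hd' : d = (d.toNat : Int) := by omega
      rw [hd', hj]
      push_cast
      ring
  · rintro (rfl | ⟨j, rfl⟩)
    · simp [PySem.Int.band]
    · have h1 : ((2 : Int) ^ j) - 1 = ((2 ^ j - 1 : Nat) : Int) := by
        have hle : (1 : Nat) ≤ 2 ^ j := Nat.one_le_two_pow
        push_cast [hle]
        ring
      have h2 : ((2 : Int) ^ j) = ((2 ^ j : Nat) : Int) := by push_cast; ring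
      rw [h1, h2, PySem.Int.band_natCast, pv_pow_land_pred]
      rfl

theorem pv_band_neg_self (y : Nat) (hy : 0 < y) :
    PySem.Int.band (y : Int) (-(y : Int)) = ((y - (y &&& (y - 1)) : Nat) : Int) := by
  have hneg : ¬ (0 : Int) ≤ -(y : Int) := by omega
  simp only [PySem.Int.band, if_pos (Int.natCast_nonneg y), if_neg hneg]
  have h1 : (-(-(y : Int)) - 1).toNat = y - 1 := by omega
  rw [h1, Int.toNat_natCast]

-- one step of A's fold, on the bit level ------------------------------------

theorem pv_step_bits (original : Int) (ho : original ≠ 0) (acc : Nat) (num : Int) :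
    ∃ r : Nat,
      (if PySem.Int.mod num original ≠ 0 then (acc : Int)
       else
         if PySem.Int.band (PySem.Int.floordiv num original)
             (PySem.Int.floordiv num original - 1) = 0 then
           PySem.Int.bor (acc : Int) (PySem.Int.floordiv num original)
         else (acc : Int)) = (r : Int) ∧
      ∀ k : Nat, r.testBit k = (acc.testBit k || decide (original * 2 ^ k = num)) := by
  by_cases hmod : PySem.Int.mod num original = 0
  · have hdvd : original ∣ num := (PySem.Int.mod_eq_zero_iff_dvd num original).mp hmod
    have hnum : PySem.Int.floordiv num original * original = num := by
      have h := PySem.Int.floordiv_mul_add_mod num original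
      omega
    by_cases hpow : PySem.Int.band (PySem.Int.floordiv num original)
        (PySem.Int.floordiv num original - 1) = 0
    · rcases (pv_band_pred_eq_zero_iff _).mp hpow with hz | ⟨j, hj⟩
      · -- quotient 0: num = 0, or-with-0 is a no-op; 0 is never original * 2 ^ k
        refine ⟨acc, ?_, ?_⟩
        · simp [hmod, hz, PySem.Int.bor_zero]
        · intro k
          have hnum0 : num = 0 := by rw [← hnum, hz]; ring
          have hne : original * 2 ^ k ≠ num := by
            rw [hnum0]
            exact mul_ne_zero ho (by positivity)
          simp [hne]
      · -- quotient 2 ^ j: the step sets bit j, and num = original * 2 ^ j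
        have h2 : ((2 : Int) ^ j) = ((2 ^ j : Nat) : Int) := by push_cast; ring
        refine ⟨acc ||| 2 ^ j, ?_, ?_⟩
        · rw [if_neg (by simp [hmod]), if_pos hpow, hj, h2, PySem.Int.bor_natCast]
        · intro k
          rw [Nat.testBit_lor, Nat.testBit_two_pow]
          have hnj : num = original * 2 ^ j := by rw [← hnum, hj]; ring
          have hiff : (original * 2 ^ k = num) ↔ (j = k) := by
            rw [hnj]
            constructor
            · intro h
              exact pv_two_pow_inj (mul_left_cancel₀ ho h.symm)
            · rintro rfl; rfl
          simp [hiff]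
    · -- quotient neither 0 nor a power of two: no k matches num
      refine ⟨acc, ?_, ?_⟩
      · simp [hmod, hpow]
      · intro k
        have hne : original * 2 ^ k ≠ num := by
          intro h
          apply hpow
          have hq : PySem.Int.floordiv num original = 2 ^ k := by
            apply mul_right_cancel₀ ho
            rw [hnum, ← h]; ring
          rw [hq]
          exact (pv_band_pred_eq_zero_iff _).mpr (Or.inr ⟨k, rfl⟩)
        simp [hne]
  · -- num not divisible by original: the step is a no-op and no k matches num
    refine ⟨acc, ?_, ?_⟩
    · simp [hmod]
    · intro k
      have hne : original * 2 ^ k ≠ num := by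
        intro h
        exact hmod ((PySem.Int.mod_eq_zero_iff_dvd num original).mpr ⟨2 ^ k, h.symm⟩)
      simp [hne]

theorem pv_fold_bits (original : Int) (ho : original ≠ 0) (l : List Int) :
    ∀ acc : Nat,
      ∃ r : Nat,
        (l.foldl (fun bits num =>
          if PySem.Int.mod num original ≠ 0 then bits
          else
            if PySem.Int.band (PySem.Int.floordiv num original)
                (PySem.Int.floordiv num original - 1) = 0 then
              PySem.Int.bor bits (PySem.Int.floordiv num original)
            else bits) (acc : Int)) = (r : Int) ∧
        ∀ k : Nat, r.testBit k = (acc.testBit k || decide (original * 2 ^ k ∈ l)) := by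
  induction l with
  | nil => intro acc; exact ⟨acc, rfl, by simp⟩
  | cons num t ih =>
      intro acc
      obtain ⟨r1, hr1, hr1t⟩ := pv_step_bits original ho acc num
      obtain ⟨r, hr, hrt⟩ := ih r1
      refine ⟨r, ?_, ?_⟩
      · rw [List.foldl_cons, hr1, hr]
      · intro k
        rw [hrt k, hr1t k]
        by_cases h1 : original * 2 ^ k = num <;> by_cases h2 : original * 2 ^ k ∈ t <;>
          simp [h1, h2, List.mem_cons]

-- B's chase loop ------------------------------------------------------------

theorem pv_chase_eq (s : PySem.Set Int) : ∀ (m : Nat) (o : Int) (fuel : Nat),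
    m < fuel → (∀ k, k < m → o * 2 ^ k ∈ s) → o * 2 ^ m ∉ s →
    pvChase s fuel o = o * 2 ^ m := by
  intro m
  induction m with
  | zero =>
      intro o fuel hf _ hout
      obtain ⟨f, rfl⟩ : ∃ f, fuel = f + 1 := ⟨fuel - 1, by omega⟩
      have ho : o ∉ s := by simpa using hout
      simp [pvChase, ho]
  | succ m ih =>
      intro o fuel hf hmem hout
      obtain ⟨f, rfl⟩ : ∃ f, fuel = f + 1 := ⟨fuel - 1, by omega⟩
      have ho : o ∈ s := by simpa using hmem 0 (by omega)
      have hmem' : ∀ k, k < m → (2 * o) * 2 ^ k ∈ s := by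
        intro k hk
        have h := hmem (k + 1) (by omega)
        have e : (2 * o) * 2 ^ k = o * 2 ^ (k + 1) := by ring
        rwa [e]
      have hout' : (2 * o) * 2 ^ m ∉ s := by
        have e : (2 * o) * 2 ^ m = o * 2 ^ (m + 1) := by ring
        rw [e]; exact hout
      have hstep : pvChase s (f + 1) o = pvChase s f (2 * o) := by simp [pvChase, ho]
      rw [hstep, ih (2 * o) f (by omega) hmem' hout']
      ring

-- pigeonhole: some original * 2 ^ k with k ≤ nums.length is not in nums -----

theorem pv_exists_escape (nums : List Int) (original : Int) (ho : original ≠ 0) :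
    ∃ k, k ≤ nums.length ∧ original * 2 ^ k ∉ nums := by
  by_contra h
  push Not at h
  have hcard : (Finset.range (nums.length + 1)).card ≤ nums.toFinset.card := by
    apply Finset.card_le_card_of_injOn (fun k => original * 2 ^ k)
    · intro k hk
      simp only [Finset.coe_range, Set.mem_Iio] at hk
      exact List.mem_toFinset.mpr (h k (by omega))
    · intro a _ b _ hab
      exact pv_two_pow_inj (mul_left_cancel₀ ho hab)
  have hlen := List.toFinset_card_le nums
  rw [Finset.card_range] at hcard
  omega

-- ===== VERDICT (by name: the statement is the Claim_ definition above) =====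
theorem findFinalValue_spec : Claim_equal_findFinalValue := by
  intro nums original _hdom hpre
  unfold Spec_findFinalValue
  rcases eq_or_ne nums ([] : List Int) with rfl | hne
  · -- empty list: A returns original * (1 &&& -1) = original, B's loop exits at once
    have hA : findFinalValue [] original = original := by
      simp only [findFinalValue, List.foldl_nil, zero_add]
      have h : PySem.Int.band 1 (-1) = 1 := by decide
      rw [h, mul_one]
    have hB : findFinalValue_alt [] original = original := by
      rw [findFinalValue_alt]
      simp [pvChase]
    rw [hA, hB]
  · have ho : original ≠ 0 := by
      rcases hpre with h | h
      · exact absurd h hne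
      · exact h
    -- m: the least k with original * 2 ^ k ∉ nums
    obtain ⟨k0, hk0len, hk0⟩ := pv_exists_escape nums original ho
    have hex : ∃ k, original * 2 ^ k ∉ nums := ⟨k0, hk0⟩
    have hmout : original * 2 ^ (Nat.find hex) ∉ nums := Nat.find_spec hex
    have hmmem : ∀ k, k < Nat.find hex → original * 2 ^ k ∈ nums := by
      intro k hk
      by_contra hc
      exact Nat.find_min hex hk hc
    have hmle : Nat.find hex ≤ nums.length := le_trans (Nat.find_le hk0) hk0len
    -- A's side
    obtain ⟨x, hx, hxt⟩ := pv_fold_bits original ho nums 0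
    rw [Nat.cast_zero] at hx
    have h1 : ∀ k, k < Nat.find hex → x.testBit k = true := by
      intro k hk
      rw [hxt k]
      simp [hmmem k hk]
    have h2 : x.testBit (Nat.find hex) = false := by
      rw [hxt (Nat.find hex)]
      simp [hmout]
    obtain ⟨a, ha⟩ := pv_succ_eq_pow_mul_odd (Nat.find hex) x h1 h2
    have hA : findFinalValue nums original = original * 2 ^ (Nat.find hex) := by
      simp only [findFinalValue]
      rw [hx]
      have hcast : (x : Int) + 1 = ((x + 1 : Nat) : Int) := by push_cast; ring
      rw [hcast, pv_band_neg_self (x + 1) (by omega), ha, pv_lowbit (Nat.find hex) a]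
      have h3 : 2 ^ (Nat.find hex) ≤ 2 ^ (Nat.find hex) * (2 * a + 1) :=
        Nat.le_mul_of_pos_right _ (by omega)
      have h4 : 2 ^ (Nat.find hex) * (2 * a + 1) - (2 ^ (Nat.find hex) * (2 * a + 1) - 2 ^ (Nat.find hex)) = 2 ^ (Nat.find hex) := Nat.sub_sub_self h3
      rw [h4]
      push_cast
      ring
    -- B's side
    have hB : findFinalValue_alt nums original = original * 2 ^ (Nat.find hex) := by
      unfold findFinalValue_alt
      apply pv_chase_eq (PySem.Set.ofList nums) (Nat.find hex) original (nums.length + 1)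
        (by omega)
      · intro k hk
        rw [PySem.Set.mem_ofList]
        exact hmmem k hk
      · rw [PySem.Set.mem_ofList]
        exact hmout
    rw [hA, hB]
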